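-- pv_equiv track=rewrite | github.com/xaviruvpadhiyar98/stock-prediction-rl | train.py | generate_past_hours_permutation
-- ===== SOURCE A (Python) =====
-- from itertools import permutations, combinations, chain
-- from typing import List, Tuple
--
-- def generate_past_hours_permutation(start: int, end: int) -> List[dict]:
--     """
--     Returns
--         [
--             [
--                 "PAST_6_HOUR",
--                 "PAST_5_HOUR"
--             ],
--             [
--                 "PAST_5_HOUR",
--                 "PAST_4_HOUR"
--             ],
--             ............
--             [
--                 "PAST_5_HOUR",
--                 "PAST_4_HOUR",
--                 "PAST_3_HOUR",
--                 "PAST_2_HOUR",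
--                 "PAST_1_HOUR"
--             ],
--             [
--                 "PAST_6_HOUR",
--                 "PAST_5_HOUR",
--                 "PAST_4_HOUR",
--                 "PAST_3_HOUR",
--                 "PAST_2_HOUR",
--                 "PAST_1_HOUR"
--             ]
--         ]
--     """
--     past_n_hours = []
--     for prev_item, curr_item in permutations(range(start, end), 2):
--         features = [f"PAST_{abs(i)}_HOUR" for i in (range(prev_item, curr_item + 1))]
--         if features:
--             past_n_hours.append(features)
--     past_n_hours.sort(key=len)
--     return past_n_hours
-- ===== SOURCE B (Python) =====
-- def generate_past_hours_permutation(start: int, end: int):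
--     result = []
--     for length in range(2, end - start + 1):
--         for prev in range(start, end - length + 1):
--             result.append([f"PAST_{abs(i)}_HOUR" for i in range(prev, prev + length)])
--     return result
-- ===== Notes on version B (the rewrite author's own statement) =====
-- stated objective: simpler
-- what changed: B generates every contiguous sublist directly in length-sorted order with two nested loops (length, then start offset), eliminating the permutations enumeration (which wastes half its pairs on empty ranges) and the final stable sort.
import Mathlib
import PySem

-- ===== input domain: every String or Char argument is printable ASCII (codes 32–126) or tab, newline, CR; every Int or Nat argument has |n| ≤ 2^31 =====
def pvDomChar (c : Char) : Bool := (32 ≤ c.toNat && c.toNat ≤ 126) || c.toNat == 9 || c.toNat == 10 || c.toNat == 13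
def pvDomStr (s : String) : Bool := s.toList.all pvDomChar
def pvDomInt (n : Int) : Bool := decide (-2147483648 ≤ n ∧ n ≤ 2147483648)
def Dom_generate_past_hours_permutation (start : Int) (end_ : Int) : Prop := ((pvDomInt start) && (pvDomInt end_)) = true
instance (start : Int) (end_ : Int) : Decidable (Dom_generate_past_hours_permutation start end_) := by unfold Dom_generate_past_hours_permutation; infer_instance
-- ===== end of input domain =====

-- B replaces A's permutations-enumeration + stable sort by two nested loops that emit the
-- contiguous sublists directly in length-sorted order (objective: simpler; not measurably faster).

-- ===== PORT A =====
def pvPastLabel (i : Int) : String := "PAST_" ++ PySem.Int.toStr |i| ++ "_HOUR"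

-- features = [f"PAST_{abs(i)}_HOUR" for i in range(prev_item, curr_item + 1)]
def pvFeatures (prev curr : Int) : List String :=
  (PySem.List.pyRange prev (curr + 1)).map pvPastLabel

-- tuple unpacking 'prev_item, curr_item' of a length-2 permutation (always matches)
def pvFeatOf (p : List Int) : List String :=
  match p with
  | prev :: curr :: _ => pvFeatures prev curr
  | _ => []

def generate_past_hours_permutation (start : Int) (end_ : Int) : List (List String) :=
  let past_n_hours :=
    (PySem.List.permutations (PySem.List.pyRange start end_) 2).foldl
      (fun acc p => if pvFeatOf p ≠ [] then acc ++ [pvFeatOf p] else acc) []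
  PySem.List.sorted past_n_hours (fun l => l.length) false

-- ===== PORT B =====
def generate_past_hours_permutation_alt (start : Int) (end_ : Int) : List (List String) :=
  (PySem.List.pyRange 2 (end_ - start + 1)).flatMap (fun length =>
    (PySem.List.pyRange start (end_ - length + 1)).map (fun prev =>
      (PySem.List.pyRange prev (prev + length)).map (fun i =>
        "PAST_" ++ PySem.Int.toStr |i| ++ "_HOUR")))

-- ===== PRECONDITION & SPEC =====
def Spec_generate_past_hours_permutation (start : Int) (end_ : Int) (out : List (List String)) : Prop := out = generate_past_hours_permutation_alt start end_
instance (start : Int) (end_ : Int) (out : List (List String)) : Decidable (Spec_generate_past_hours_permutation start end_ out) := by unfold Spec_generate_past_hours_permutation; infer_instance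

-- ===== CLAIM (what is proved, stated in full; the proofs are below) =====
def Claim_equal_generate_past_hours_permutation : Prop := ∀ (start : Int) (end_ : Int), Dom_generate_past_hours_permutation start end_ → Spec_generate_past_hours_permutation start end_ (generate_past_hours_permutation start end_)

-- ===== LEMMAS AND PROOFS =====

theorem pyRange_eq_map (a b : Int) :
    PySem.List.pyRange a b = (List.range (b - a).toNat).map (fun j : Nat => a + (j : Int)) := by
  simp only [PySem.List.pyRange]
  split_ifs with h0 h1 <;> try omega
  · simp
  · have h : (b - a).toNat = 0 := by omega
    simp [h]

-- insertBy passes over a prefix it does not go before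
theorem insertBy_append_not_before {α : Type} (before : α → α → Bool) (x : α) (u v : List α)
    (h : ∀ y ∈ u, before x y = false) :
    PySem.List.insertBy before x (u ++ v) = u ++ PySem.List.insertBy before x v := by
  induction u with
  | nil => simp
  | cons y ys ih =>
    simp only [List.cons_append, PySem.List.insertBy]
    rw [h y (by simp)]
    simp only [Bool.false_eq_true, if_false]
    rw [ih (fun z hz => h z (by simp [hz]))]

theorem insertBy_all_before {α : Type} (before : α → α → Bool) (x : α) (v : List α)
    (h : ∀ y ∈ v, before x y = true) :
    PySem.List.insertBy before x v = x :: v := by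
  cases v with
  | nil => simp [PySem.List.insertBy]
  | cons y ys => simp [PySem.List.insertBy, h y (by simp)]

-- inserting into a key-grouped concatenation appends at the end of x's key group (stability)
theorem insertBy_flatMap_groups {α : Type} (key : α → Nat) (x : α) (K : List Nat) (g : Nat → List α)
    (hK : K.Pairwise (· < ·)) (hg : ∀ k ∈ K, ∀ y ∈ g k, key y = k) (hx : key x ∈ K) :
    PySem.List.insertBy (fun a b => decide (key a < key b)) x (K.flatMap g)
      = K.flatMap (fun k => if k = key x then g k ++ [x] else g k) := by
  induction K with
  | nil => simp at hx
  | cons k K ih =>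
    have hKlt : ∀ k' ∈ K, k < k' := (List.pairwise_cons.mp hK).1
    simp only [List.flatMap_cons]
    by_cases hk : k = key x
    · subst hk
      rw [insertBy_append_not_before _ _ _ _ (by
        intro y hy
        have := hg (key x) (by simp) y hy
        simp [this])]
      rw [insertBy_all_before _ _ _ (by
        intro y hy
        simp only [List.mem_flatMap] at hy
        obtain ⟨k', hk', hy'⟩ := hy
        have hkey := hg k' (by simp [hk']) y hy'
        have : key x < k' := hKlt k' hk'
        simp [hkey]; omega)]
      have heq : ∀ k' ∈ K, (if k' = key x then g k' ++ [x] else g k') = g k' := by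
        intro k' hk'
        have : key x < k' := hKlt k' hk'
        rw [if_neg (by omega)]
      rw [if_pos rfl, List.flatMap_congr heq]
      simp
    · have hx' : key x ∈ K := by
        rcases List.mem_cons.mp hx with h | h
        · exact absurd h.symm hk
        · exact h
      have hkx : k < key x := hKlt _ hx'
      rw [insertBy_append_not_before _ _ _ _ (by
        intro y hy
        have := hg k (by simp) y hy
        simp [this]; omega)]
      rw [ih (List.pairwise_cons.mp hK).2 (fun k' h' y hy => hg k' (by simp [h']) y hy) hx']
      rw [if_neg hk]

-- stability of Python's sort: sorted(xs, key) is the concatenation, over the ascending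
-- key values K, of xs's subsequences with that key
theorem sorted_stable_groups {α : Type} (key : α → Nat) (K : List Nat) (xs : List α)
    (hK : K.Pairwise (· < ·)) (hxs : ∀ a ∈ xs, key a ∈ K) :
    PySem.List.sorted xs key false = K.flatMap (fun k => xs.filter (fun a => key a == k)) := by
  induction xs using List.reverseRecOn with
  | nil => simp [PySem.List.sorted_eq_foldl_insertBy]
  | append_singleton xs x ih =>
    have hxs' : ∀ a ∈ xs, key a ∈ K := fun a ha => hxs a (by simp [ha])
    rw [PySem.List.sorted_eq_foldl_insertBy, List.foldl_append, List.foldl_cons, List.foldl_nil,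
        ← PySem.List.sorted_eq_foldl_insertBy, ih hxs']
    rw [insertBy_flatMap_groups key x K _ hK
        (fun k hk y hy => by
          have h2 := (List.mem_filter.mp hy).2
          simpa using h2)
        (hxs x (by simp))]
    apply List.flatMap_congr
    intro k hk
    by_cases h : k = key x
    · subst h
      simp [List.filter_append]
    · simp [List.filter_append, h, Ne.symm h]

theorem perm_one {α : Type} (ys : List α) :
    PySem.List.permutations ys 1 = ys.map (fun c => [c]) := by
  rw [PySem.List.permutations]
  induction ys with
  | nil => simp
  | cons y ys ih =>
    simp only [List.length_cons, List.range_succ_eq_map, List.flatMap_cons, List.flatMap_map]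
    rw [List.flatMap_congr (g := fun i =>
        match ys[i]? with
        | none => []
        | some x => List.map (fun p => x :: p) (PySem.List.permutations (ys.eraseIdx i) 0))
      (by
        intro i hi
        simp only [Nat.succ_eq_add_one, List.getElem?_cons_succ, List.eraseIdx_cons_succ]
        cases h : ys[i]? with
        | none => simp
        | some x => simp)]
    refine Eq.trans (b := [[y]] ++ List.map (fun c => [c]) ys) ?_ (by simp)
    exact congrArg (fun z => [[y]] ++ z) ih

theorem perm_two {α : Type} (xs : List α) :
    PySem.List.permutations xs 2 =
      (List.range xs.length).flatMap (fun i =>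
        match xs[i]? with
        | none => []
        | some p => (xs.eraseIdx i).map (fun c => [p, c])) := by
  rw [PySem.List.permutations]
  apply List.flatMap_congr
  intro i hi
  simp only [List.mem_range] at hi
  rw [List.getElem?_eq_getElem hi]
  simp only
  rw [perm_one]
  simp [List.map_map]

-- the feature row for offsets i (prev) and k (curr) from start
def pvF (start : Int) (i k : Nat) : List String := pvFeatures (start + i) (start + k)

theorem pvF_length (start : Int) (i k : Nat) (h : i ≤ k) :
    (pvF start i k).length = k + 1 - i := by
  simp only [pvF, pvFeatures, pyRange_eq_map, List.length_map, List.length_range]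
  omega

theorem pvFeatures_eq_nil_iff (p c : Int) : pvFeatures p c = [] ↔ c < p := by
  rw [pvFeatures, pyRange_eq_map]
  simp only [List.map_eq_nil_iff, List.range_eq_nil]
  omega

theorem eraseIdx_range (n i : Nat) (h : i < n) :
    (List.range n).eraseIdx i = List.range i ++ List.range' (i + 1) (n - (i + 1)) := by
  have h1 : List.range n = List.range' 0 i ++ List.range' i (n - i) := by
    rw [List.range_eq_range']
    have := @List.range'_append 0 i (n - i) 1
    simp only [one_mul, Nat.zero_add] at this
    rw [this]
    congr 1
    omega
  rw [h1, List.eraseIdx_append_of_length_le (by simp)]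
  have h2 : List.range' i (n - i) = i :: List.range' (i + 1) (n - (i + 1)) := by
    have : n - i = (n - (i + 1)) + 1 := by omega
    rw [this, List.range'_succ]
  rw [h2]
  simp [List.range_eq_range']

-- A's appended-features list, regrouped by the first offset
theorem A_unsorted_eq (start end_ : Int) :
    ((PySem.List.permutations (PySem.List.pyRange start end_) 2).foldl
      (fun acc p => if pvFeatOf p ≠ [] then acc ++ [pvFeatOf p] else acc) [])
    = (List.range (end_ - start).toNat).flatMap (fun i =>
        (List.range' (i + 1) ((end_ - start).toNat - (i + 1))).map (fun k => pvF start i k)) := by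
  rw [PySem.List.foldl_append_ite]
  rw [List.nil_append]
  rw [perm_two, pyRange_eq_map]
  simp only [List.length_map, List.length_range]
  rw [List.filter_flatMap, List.map_flatMap]
  apply List.flatMap_congr
  intro i hi
  simp only [List.mem_range] at hi
  rw [List.getElem?_map, List.getElem?_range hi]
  simp only [Option.map_some]
  rw [List.eraseIdx_map, eraseIdx_range _ _ hi]
  simp only [List.map_map, List.map_append, List.filter_append, List.filter_map, List.map_map]
  have hnil : List.filter ((fun x => decide (pvFeatOf x ≠ [])) ∘ (fun c => [(start + (i:Int)), c]) ∘ (fun j : Nat => start + (j:Int))) (List.range i) = [] := by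
    rw [List.filter_eq_nil_iff]
    intro j hj
    simp only [List.mem_range] at hj
    simp only [Function.comp, pvFeatOf, decide_not]
    rw [show pvFeatures (start + (i:Int)) (start + (j:Int)) = [] from (pvFeatures_eq_nil_iff _ _).mpr (by omega)]
    simp
  have hself : List.filter ((fun x => decide (pvFeatOf x ≠ [])) ∘ (fun c => [(start + (i:Int)), c]) ∘ (fun j : Nat => start + (j:Int))) (List.range' (i+1) ((end_ - start).toNat - (i+1))) = List.range' (i+1) ((end_ - start).toNat - (i+1)) := by
    rw [List.filter_eq_self]
    intro j hj
    simp only [List.mem_range'] at hj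
    obtain ⟨t, ht, rfl⟩ := hj
    have hne : ¬ (pvFeatures (start + (i:Int)) (start + ((i+1+1*t : Nat):Int)) = []) := by
      rw [pvFeatures_eq_nil_iff]; push_cast; omega
    simp only [Function.comp, pvFeatOf, decide_not]
    simpa using hne
  rw [hnil, hself]
  apply List.map_congr_left
  intro j hj
  simp [Function.comp, pvFeatOf, pvF]

-- B regrouped the same way
theorem B_eq (start end_ : Int) :
    generate_past_hours_permutation_alt start end_
    = (List.range ((end_ - start).toNat - 1)).flatMap (fun l =>
        (List.range ((end_ - start).toNat - l - 2 + 1)).map (fun p => pvF start p (p + l + 1))) := by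
  unfold generate_past_hours_permutation_alt
  simp only [pyRange_eq_map]
  rw [show (end_ - start + 1 - 2).toNat = (end_ - start).toNat - 1 by omega]
  rw [List.flatMap_map]
  apply List.flatMap_congr
  intro l hl
  simp only [List.mem_range] at hl
  rw [show (end_ - (2 + (l : Int)) + 1 - start).toNat = (end_ - start).toNat - l - 2 + 1 by omega]
  rw [List.map_map]
  apply List.map_congr_left
  intro p hp
  simp only [Function.comp, pvF, pvFeatures, pyRange_eq_map]
  rw [show (start + (p : Int) + (2 + (l : Int)) - (start + (p : Int))).toNat =
      (start + ((p + l + 1 : Nat) : Int) + 1 - (start + (p : Int))).toNat by push_cast; omega]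
  apply List.map_congr_left
  intro t ht
  simp only [pvPastLabel]

theorem filter_beq_range' (a m v : Nat) :
    (List.range' a m).filter (fun k => k == v) = if a ≤ v ∧ v < a + m then [v] else [] := by
  induction m generalizing a with
  | zero => simp
  | succ m ih =>
    rw [List.range'_succ, List.filter_cons]
    by_cases hv : a = v
    · subst hv
      simp only [BEq.rfl, if_pos]
      rw [ih]
      rw [if_neg (by omega), if_pos (by omega)]
    · rw [if_neg (by simpa using hv)]
      rw [ih]
      by_cases hc : a + 1 ≤ v ∧ v < a + 1 + m
      · rw [if_pos hc, if_pos (by omega)]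
      · rw [if_neg hc, if_neg (by omega)]

-- regrouping A's rows by length gives B's rows
theorem regroup_eq (start end_ : Int) :
    ((List.range ((end_ - start).toNat - 1)).map (fun l => l + 2)).flatMap (fun k =>
      ((List.range (end_ - start).toNat).flatMap (fun i =>
        (List.range' (i + 1) ((end_ - start).toNat - (i + 1))).map (fun k => pvF start i k))).filter
        (fun a => a.length == k))
    = (List.range ((end_ - start).toNat - 1)).flatMap (fun l =>
        (List.range ((end_ - start).toNat - l - 2 + 1)).map (fun p => pvF start p (p + l + 1))) := by
  rw [List.flatMap_map]
  apply List.flatMap_congr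
  intro l hl
  simp only [List.mem_range] at hl
  simp only [List.filter_flatMap, List.filter_map]
  set n := (end_ - start).toNat with hn
  have hper : ∀ i ∈ List.range n,
      (List.map (fun k => pvF start i k)
        ((List.range' (i + 1) (n - (i + 1))).filter ((fun a => a.length == l + 2) ∘ (fun k => pvF start i k))))
      = if i + l + 2 ≤ n then [pvF start i (i + l + 1)] else [] := by
    intro i hi
    simp only [List.mem_range] at hi
    rw [List.filter_congr (q := fun k => k == i + l + 1) (by
      intro k hk
      simp only [List.mem_range'] at hk
      obtain ⟨t, ht, rfl⟩ := hk
      simp only [Function.comp_apply]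
      rw [pvF_length _ _ _ (by omega)]
      simp only [beq_eq_decide]
      rw [decide_eq_decide]
      omega)]
    rw [filter_beq_range']
    by_cases hc : i + l + 2 ≤ n
    · rw [if_pos (by omega), if_pos hc]
      simp
    · rw [if_neg (by omega), if_neg hc]
      simp
  rw [List.flatMap_congr hper]
  have hsplit : List.range n = List.range' 0 (n - l - 1) ++ List.range' (n - l - 1) (n - (n - l - 1)) := by
    rw [List.range_eq_range']
    have := @List.range'_append 0 (n - l - 1) (n - (n - l - 1)) 1
    simp only [one_mul, Nat.zero_add] at this
    rw [this]
    congr 1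
    omega
  rw [hsplit, List.flatMap_append]
  have h1 : (List.range' 0 (n - l - 1)).flatMap (fun i => if i + l + 2 ≤ n then [pvF start i (i + l + 1)] else [])
      = (List.range (n - l - 2 + 1)).map (fun p => pvF start p (p + l + 1)) := by
    rw [List.flatMap_congr (g := fun i => [pvF start i (i + l + 1)]) (by
      intro i hi
      simp only [List.mem_range'] at hi
      obtain ⟨t, ht, rfl⟩ := hi
      rw [if_pos (by omega)])]
    rw [← List.map_eq_flatMap]
    rw [← List.range_eq_range']
    have hn2 : n - l - 2 + 1 = n - l - 1 := by omega
    rw [hn2]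
  have h2 : (List.range' (n - l - 1) (n - (n - l - 1))).flatMap (fun i => if i + l + 2 ≤ n then [pvF start i (i + l + 1)] else []) = [] := by
    rw [List.flatMap_congr (g := fun _ => []) (by
      intro i hi
      simp only [List.mem_range'] at hi
      obtain ⟨t, ht, rfl⟩ := hi
      rw [if_neg (by omega)])]
    simp
  rw [h1, h2, List.append_nil]

-- ===== VERDICT (by name: the statement is the Claim_ definition above) =====
theorem generate_past_hours_permutation_spec : Claim_equal_generate_past_hours_permutation := by
  intro start end_ _
  unfold Spec_generate_past_hours_permutation generate_past_hours_permutation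
  simp only
  rw [A_unsorted_eq]
  have hpair : (((List.range ((end_ - start).toNat - 1)).map (fun l => l + 2)) : List Nat).Pairwise (· < ·) := by
    exact List.Pairwise.map _ (fun a b h => by omega) List.pairwise_lt_range
  have hcov : ∀ a ∈ (List.range (end_ - start).toNat).flatMap (fun i =>
        (List.range' (i + 1) ((end_ - start).toNat - (i + 1))).map (fun k => pvF start i k)),
      (fun l : List String => l.length) a ∈ ((List.range ((end_ - start).toNat - 1)).map (fun l => l + 2)) := by
    intro a ha
    simp only [List.mem_flatMap, List.mem_map, List.mem_range, List.mem_range'] at ha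
    obtain ⟨i, hi, k, ⟨t, ht, rfl⟩, rfl⟩ := ha
    simp only [List.mem_map, List.mem_range]
    refine ⟨t, by omega, ?_⟩
    rw [pvF_length _ _ _ (by omega)]
    omega
  rw [sorted_stable_groups (fun l : List String => l.length)
        ((List.range ((end_ - start).toNat - 1)).map (fun l => l + 2)) _ hpair hcov]
  rw [B_eq]
  exact regroup_eq start end_
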